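-- pv_equiv track=rewrite | github.com/asedish07/Coding | 프로그래머스/unrated/181831. 특별한 이차원 배열 2/특별한 이차원 배열 2.py | solution
-- ===== SOURCE A (Python) =====
-- def solution(arr):
--     answer = 0
--     cnt = 0
--     n = len(arr)
--     for i in range(n):
--         for j in range(n):
--             if arr[i][j] == arr[j][i]:
--                 cnt += 1
--     if cnt == n ** 2:
--         answer = 1
--     return answer
-- ===== SOURCE B (Python) =====
-- def solution(arr):
--     n = len(arr)
--     return 1 if [row[:n] for row in arr] == [[row[i] for row in arr] for i in range(n)] else 0
-- ===== Notes on version B (the rewrite author's own statement) =====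
-- stated objective: idiomatic
-- what changed: Replaced the nested index loop that counts matching (i,j)/(j,i) pairs and compares the counter to n**2 by building the transpose of the n-by-n leading block (the only entries A reads) as a comprehension and doing one whole-block equality comparison.
import Mathlib
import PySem

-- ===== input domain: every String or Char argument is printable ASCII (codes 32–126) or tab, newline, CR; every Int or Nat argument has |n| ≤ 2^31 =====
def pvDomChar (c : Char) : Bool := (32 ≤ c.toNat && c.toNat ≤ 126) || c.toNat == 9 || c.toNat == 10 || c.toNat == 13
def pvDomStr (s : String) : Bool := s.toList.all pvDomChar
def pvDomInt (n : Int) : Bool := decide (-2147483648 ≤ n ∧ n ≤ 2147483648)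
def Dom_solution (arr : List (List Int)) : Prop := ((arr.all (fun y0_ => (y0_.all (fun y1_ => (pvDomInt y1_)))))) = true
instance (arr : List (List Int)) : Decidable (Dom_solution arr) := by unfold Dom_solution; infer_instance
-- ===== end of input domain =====

-- B compares the n×n leading block (the first n entries of each row, all that A ever reads)
-- with its transpose in one equality test, instead of A's nested counting loop checked
-- against n**2 (objective: idiomatic).


-- ===== PORT A =====
def solution (arr : List (List Int)) : Int :=
  let n : Int := (arr.length : Int)
  let cnt : Int :=
    (PySem.List.pyRange 0 n 1).foldl (fun cnt i =>
      (PySem.List.pyRange 0 n 1).foldl (fun cnt j =>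
        if PySem.List.pyGetD (PySem.List.pyGetD arr i []) j 0
             = PySem.List.pyGetD (PySem.List.pyGetD arr j []) i 0
        then cnt + 1 else cnt) cnt) 0
  if cnt = n ^ 2 then 1 else 0

-- ===== PORT B =====
def solution_alt (arr : List (List Int)) : Int :=
  let n : Int := (arr.length : Int)
  if arr.map (fun row => PySem.List.slice row none (some n))
       = (PySem.List.pyRange 0 n 1).map (fun i => arr.map (fun row => PySem.List.pyGetD row i 0))
  then 1 else 0

-- ===== PRECONDITION & SPEC =====
-- Pre_ excludes exactly the inputs where A raises IndexError: a row shorter than len(arr)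
-- (the problem guarantees an n×n matrix); everywhere else A returns normally.
def Pre_solution (arr : List (List Int)) : Prop :=
  ∀ r ∈ arr, arr.length ≤ r.length
instance (arr : List (List Int)) : Decidable (Pre_solution arr) := by
  unfold Pre_solution; infer_instance

def pvWitness_solution : List (List Int) := [[1, 2], [2, 1]]

def Spec_solution (arr : List (List Int)) (out : Int) : Prop := out = solution_alt arr
instance (arr : List (List Int)) (out : Int) : Decidable (Spec_solution arr out) := by unfold Spec_solution; infer_instance

-- ===== CLAIM (what is proved, stated in full; the proofs are below) =====
def Claim_equal_solution : Prop := ∀ (arr : List (List Int)), Dom_solution arr → Pre_solution arr → Spec_solution arr (solution arr)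

-- ===== LEMMAS AND PROOFS =====

-- the symmetry property of the n×n leading block (the second conjunct of D_solution)
def pvSym (arr : List (List Int)) : Prop :=
  ∀ i < arr.length, ∀ j < arr.length,
    (arr.getD i []).getD j 0 = (arr.getD j []).getD i 0

-- the transpose B builds, written over List.range / List.getD
def pvT (arr : List (List Int)) : List (List Int) :=
  (List.range arr.length).map (fun k => arr.map (fun row => row.getD k 0))

theorem alt_T (arr : List (List Int)) :
    (PySem.List.pyRange 0 ((arr.length : Nat) : Int) 1).map
      (fun i => arr.map (fun row => PySem.List.pyGetD row i 0)) = pvT arr := by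
  rw [PySem.List.pyRange_zero_natCast, List.map_map]
  apply List.map_congr_left
  intro k _
  simp [PySem.List.pyGetD_natCast]

theorem pv_getD_take (l : List Int) (n k : Nat) (hk : k < n) :
    (l.take n).getD k 0 = l.getD k 0 := by
  by_cases h : k < l.length
  · rw [List.getD_eq_getElem _ _ (by simp [h, hk]), List.getD_eq_getElem _ _ h]
    simp
  · rw [List.getD_eq_default _ _ (by simp; omega), List.getD_eq_default _ _ (by omega)]

-- B's test decides pvSym on square matrices
theorem alt_iff (arr : List (List Int)) (hsq : ∀ r ∈ arr, r.length = arr.length) :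
    arr = pvT arr ↔ pvSym arr := by
  set n := arr.length with hn
  set T := pvT arr with hT
  have hTget : ∀ i : Nat, i < n → T.getD i [] = arr.map (fun r => r.getD i 0) := by
    intro i hi
    rw [List.getD_eq_getElem _ _ (by simp [hT, pvT, hi, ← hn])]
    simp [hT, pvT]
  have hmapget : ∀ i j : Nat, j < n →
      (arr.map (fun r => r.getD i 0)).getD j 0 = (arr.getD j []).getD i 0 := by
    intro i j hj
    rw [List.getD_eq_getElem _ 0 (by simpa using hj),
        List.getD_eq_getElem arr [] (by simpa using hj)]
    simp
  constructor
  · intro heq i hi j hj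
    calc (arr.getD i []).getD j 0
        = (T.getD i []).getD j 0 := by rw [← heq]
      _ = (arr.getD j []).getD i 0 := by rw [hTget i hi, hmapget i j hj]
  · intro hsym
    apply List.ext_getElem
    · simp [hT, pvT, ← hn]
    · intro i hi hi'
      have hin : i < n := by simpa [← hn] using hi
      rw [show T[i]'hi' = arr.map (fun r => r.getD i 0) by simp [hT, pvT]]
      apply List.ext_getElem
      · simp [hsq arr[i] (List.getElem_mem hi), ← hn]
      · intro j hj hj'
        have hjn : j < n := by
          simpa [hsq arr[i] (List.getElem_mem hi)] using hj
        have hs := hsym i hin j hjn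
        rw [List.getD_eq_getElem arr [] hi,
            List.getD_eq_getElem arr [] (by simpa [← hn] using hjn),
            List.getD_eq_getElem _ 0 hj] at hs
        simpa using hs

theorem pv_sum_le (l : List Int) (c : Int) (hb : ∀ x ∈ l, x ≤ c) :
    l.sum ≤ (l.length : Int) * c := by
  induction l with
  | nil => simp
  | cons a t ih =>
    have ha := hb a (by simp)
    have ht := ih (fun x hx => hb x (by simp [hx]))
    simp only [List.sum_cons, List.length_cons]
    push_cast
    nlinarith

theorem pv_sum_eq_iff (l : List Int) (c : Int) (hb : ∀ x ∈ l, x ≤ c) :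
    l.sum = (l.length : Int) * c ↔ ∀ x ∈ l, x = c := by
  induction l with
  | nil => simp
  | cons a t ih =>
    have ha := hb a (by simp)
    have hbt : ∀ x ∈ t, x ≤ c := fun x hx => hb x (by simp [hx])
    have hts := pv_sum_le t c hbt
    have iht := ih hbt
    simp only [List.sum_cons, List.length_cons]
    constructor
    · intro h
      have hac : a = c := by push_cast at h; nlinarith
      have hsum : t.sum = (t.length : Int) * c := by push_cast at h ⊢; nlinarith
      intro x hx
      rcases List.mem_cons.mp hx with rfl | hx'
      · exact hac
      · exact iht.mp hsum x hx'
    · intro h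
      have hac : a = c := h a (by simp)
      have hsum : t.sum = (t.length : Int) * c :=
        iht.mpr (fun x hx => h x (by simp [hx]))
      rw [hac, hsum]
      push_cast
      ring

-- A's counter reaches n^2 exactly when pvSym holds
theorem cnt_iff (arr : List (List Int)) :
    ((PySem.List.pyRange 0 (arr.length : Int) 1).foldl (fun cnt i =>
      (PySem.List.pyRange 0 (arr.length : Int) 1).foldl (fun cnt j =>
        if PySem.List.pyGetD (PySem.List.pyGetD arr i []) j 0
             = PySem.List.pyGetD (PySem.List.pyGetD arr j []) i 0
        then cnt + 1 else cnt) cnt) 0 = ((arr.length : Int)) ^ 2) ↔ pvSym arr := by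
  set n := arr.length with hn
  set g : Int → Int := fun i =>
      ((PySem.List.pyRange 0 (n : Int) 1).countP (fun j => decide
        (PySem.List.pyGetD (PySem.List.pyGetD arr i []) j 0
          = PySem.List.pyGetD (PySem.List.pyGetD arr j []) i 0)) : Int) with hg
  have hfun : (fun (cnt i : Int) =>
      (PySem.List.pyRange 0 (n : Int) 1).foldl (fun cnt j =>
        if PySem.List.pyGetD (PySem.List.pyGetD arr i []) j 0
             = PySem.List.pyGetD (PySem.List.pyGetD arr j []) i 0
        then cnt + 1 else cnt) cnt)
      = (fun (cnt i : Int) => cnt + g i) := by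
    funext cnt i
    exact PySem.List.foldl_ite_add_one _ _ cnt
  rw [hfun, PySem.List.foldl_add, zero_add]
  have hlenr : (PySem.List.pyRange 0 (n : Int) 1).length = n := by
    simp [PySem.List.length_pyRange_one]
  have hbound : ∀ x ∈ (PySem.List.pyRange 0 (n : Int) 1).map g, x ≤ (n : Int) := by
    intro x hx
    simp only [List.mem_map] at hx
    obtain ⟨i, _, rfl⟩ := hx
    have hc := List.countP_le_length (l := PySem.List.pyRange 0 (n : Int) 1)
      (p := fun j => decide (PySem.List.pyGetD (PySem.List.pyGetD arr i []) j 0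
          = PySem.List.pyGetD (PySem.List.pyGetD arr j []) i 0))
    rw [hlenr] at hc
    simp only [hg]
    exact_mod_cast hc
  have hlen2 : (((PySem.List.pyRange 0 (n : Int) 1).map g).length : Int) = (n : Int) := by
    simp [hlenr]
  have hsq : ((n : Int)) ^ 2 = (((PySem.List.pyRange 0 (n : Int) 1).map g).length : Int) * (n : Int) := by
    rw [hlen2]; ring
  rw [hsq, pv_sum_eq_iff _ _ hbound]
  have hinner : ∀ i : Int, (g i = (n : Int)) ↔ ∀ j ∈ PySem.List.pyRange 0 (n : Int) 1,
      PySem.List.pyGetD (PySem.List.pyGetD arr i []) j 0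
        = PySem.List.pyGetD (PySem.List.pyGetD arr j []) i 0 := by
    intro i
    simp only [hg]
    have hcl := List.countP_eq_length
      (l := PySem.List.pyRange 0 (n : Int) 1)
      (p := fun j => decide (PySem.List.pyGetD (PySem.List.pyGetD arr i []) j 0
          = PySem.List.pyGetD (PySem.List.pyGetD arr j []) i 0))
    rw [Nat.cast_inj]
    constructor
    · intro h j hj
      have := hcl.mp (by rw [h, hlenr]) j hj
      simpa using this
    · intro h
      have := hcl.mpr (by intro a ha; simpa using h a ha)
      rw [this, hlenr]
  constructor
  · intro h i hi j hj
    have hi' : (i : Int) ∈ PySem.List.pyRange 0 (n : Int) 1 := by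
      rw [PySem.List.mem_pyRange_one]; exact ⟨by positivity, by exact_mod_cast hi⟩
    have hj' : (j : Int) ∈ PySem.List.pyRange 0 (n : Int) 1 := by
      rw [PySem.List.mem_pyRange_one]; exact ⟨by positivity, by exact_mod_cast hj⟩
    have hgi : g i = (n : Int) := h (g i) (List.mem_map_of_mem hi')
    have := (hinner i).mp hgi j hj'
    simpa [PySem.List.pyGetD_natCast] using this
  · intro hsym x hx
    simp only [List.mem_map] at hx
    obtain ⟨i, hi, rfl⟩ := hx
    rw [hinner i]
    intro j hj
    rw [PySem.List.mem_pyRange_one] at hi hj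
    obtain ⟨hi0, hiN⟩ := hi
    obtain ⟨hj0, hjN⟩ := hj
    have hi' : i = ((i.toNat : Nat) : Int) := by omega
    have hj' : j = ((j.toNat : Nat) : Int) := by omega
    rw [hi', hj']
    simp only [PySem.List.pyGetD_natCast]
    exact hsym i.toNat (by omega) j.toNat (by omega)

-- A returns 1 iff pvSym holds, as an if-free statement about the port
theorem solutionA_iff (arr : List (List Int)) : solution arr = 1 ↔ pvSym arr := by
  unfold solution
  simp only
  rw [← cnt_iff arr]
  split_ifs with h
  · simp [h]
  · simp [h]

-- ===== VERDICT (by name: the statement is the Claim_ definition above) =====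
theorem solution_spec : Claim_equal_solution := by
  intro arr _ hpre
  show solution arr = solution_alt arr
  unfold solution_alt
  simp only
  rw [alt_T arr]
  have hlead : arr.map (fun row => PySem.List.slice row none (some (arr.length : Int)))
      = arr.map (fun r => r.take arr.length) := by
    apply List.map_congr_left
    intro r _
    exact PySem.List.slice_to_natCast r arr.length
  rw [hlead]
  set n := arr.length with hn
  set L := arr.map (fun r => r.take n) with hL
  have hLlen : L.length = n := by simp [hL, ← hn]
  have hTL : pvT L = pvT arr := by
    unfold pvT
    rw [hLlen, ← hn]
    apply List.map_congr_left
    intro k hk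
    rw [hL, List.map_map]
    apply List.map_congr_left
    intro r _
    exact pv_getD_take r n k (List.mem_range.mp hk)
  have hsqL : ∀ r ∈ L, r.length = L.length := by
    intro r hr
    rw [hL] at hr
    simp only [List.mem_map] at hr
    obtain ⟨u, hu, rfl⟩ := hr
    have := hpre u hu
    simp [hLlen]
    omega
  have hentry : ∀ i < n, ∀ j < n, (L.getD i []).getD j 0 = (arr.getD i []).getD j 0 := by
    intro i hi j hj
    rw [List.getD_eq_getElem L [] (by rw [hLlen]; exact hi),
        List.getD_eq_getElem arr [] hi]
    simp only [hL, List.getElem_map]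
    exact pv_getD_take _ n j hj
  have hsymLA : pvSym L ↔ pvSym arr := by
    unfold pvSym
    rw [hLlen, ← hn]
    constructor
    · intro h i hi j hj
      rw [← hentry i hi j hj, ← hentry j hj i hi]
      exact h i hi j hj
    · intro h i hi j hj
      rw [hentry i hi j hj, hentry j hj i hi]
      exact h i hi j hj
  have hiff : (L = pvT arr) ↔ pvSym arr := by
    rw [← hTL, alt_iff L hsqL, hsymLA]
  have hA := (solutionA_iff arr).trans hiff.symm
  by_cases hb : L = pvT arr
  · rw [if_pos hb, hA.mpr hb]
  · rw [if_neg hb]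
    rcases Int.lt_or_lt_of_ne (fun hc => hb (hA.mp hc)) with hlt | hlt
    all_goals {
      unfold solution at *
      simp only at *
      split_ifs at hlt ⊢ <;> omega }
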